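-- pv_equiv track=rewrite | github.com/mak989063/python-core-concepts | DSA/amazing_substring_dsa.py | amazing_substring_dsa
-- ===== SOURCE A (Python) =====
-- def amazing_substring_dsa(A):
--     vowels = "aeiouAEIOU"
--     n = len(A)
--     count = 0
--
--     for i in range(n):
--         if A[i] in vowels:
--             count += (n - i)
--
--     return count % 10003
-- ===== SOURCE B (Python) =====
-- def amazing_substring_dsa(A):
--     n = len(A)
--     total = 0
--     for v in "aeiouAEIOU":
--         i = A.find(v)
--         while i != -1:
--             total += n - i
--             i = A.find(v, i + 1)
--     return total % 10003
-- ===== Notes on version B (the rewrite author's own statement) =====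
-- stated objective: alternative
-- what changed: B abandons A's single indexed scan: it makes one str.find pass per vowel character (10 staged passes), jumping from occurrence to occurrence with find(v, i+1) and adding n-i at each hit, instead of testing membership in the vowel string at every index.
import Mathlib
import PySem

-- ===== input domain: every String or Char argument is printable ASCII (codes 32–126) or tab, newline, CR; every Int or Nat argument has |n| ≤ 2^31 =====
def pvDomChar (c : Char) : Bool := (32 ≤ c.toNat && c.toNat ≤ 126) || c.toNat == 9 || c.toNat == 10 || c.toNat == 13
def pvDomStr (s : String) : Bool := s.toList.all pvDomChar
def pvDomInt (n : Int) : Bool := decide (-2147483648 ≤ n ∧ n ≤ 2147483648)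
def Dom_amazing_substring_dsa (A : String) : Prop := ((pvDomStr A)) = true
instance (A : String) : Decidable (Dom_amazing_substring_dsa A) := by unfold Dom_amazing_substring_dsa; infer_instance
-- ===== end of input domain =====

-- B replaces A's single indexed membership scan by ten staged str.find passes, one per
-- vowel character, jumping occurrence-to-occurrence; same asymptotic cost, different algorithm.


-- ===== PORT A =====
def amazing_substring_dsa (A : String) : Int :=
  let vowels : String := "aeiouAEIOU"
  let n : Int := PySem.Str.len A
  let count : Int := (PySem.List.pyRange 0 n 1).foldl (fun count i =>
    match PySem.Str.pyGet? A i with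
    | some c => if vowels.toList.contains c then count + (n - i) else count
    | none => count) 0
  PySem.Int.mod count 10003

-- ===== PORT B =====
-- Python's `i = A.find(v)` / `while i != -1: total += n - i; i = A.find(v, i + 1)`.
-- The `L.length < start` guard only makes the recursion total; Python's find returns -1
-- there anyway, so the branch returns what Python would.
def pvFindLoop (L : List Char) (v : Char) : Nat → Int → Nat → Int
  | 0, total, _ => total
  | fuel+1, total, start =>
    if L.length < start then total
    else
      let j := PySem.Chars.findFrom L [v] (start : Int) none
      if j = -1 then total
      else pvFindLoop L v fuel (total + ((L.length : Int) - j)) (j.toNat + 1)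

def amazing_substring_dsa_alt (A : String) : Int :=
  let total : Int := "aeiouAEIOU".toList.foldl (fun total v =>
    pvFindLoop A.toList v (A.toList.length + 1) total 0) 0
  PySem.Int.mod total 10003

-- ===== PRECONDITION & SPEC =====
def Spec_amazing_substring_dsa (A : String) (out : Int) : Prop := out = amazing_substring_dsa_alt A
instance (A : String) (out : Int) : Decidable (Spec_amazing_substring_dsa A out) := by unfold Spec_amazing_substring_dsa; infer_instance

-- ===== CLAIM (what is proved, stated in full; the proofs are below) =====
def Claim_equal_amazing_substring_dsa : Prop := ∀ (A : String), Dom_amazing_substring_dsa A → Spec_amazing_substring_dsa A (amazing_substring_dsa A)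

-- ===== LEMMAS AND PROOFS =====

-- weighted vowel sum: Σ over positions i with p (L[i]) of (L.length - i)
def pvSva (p : Char → Bool) : List Char → Int
  | [] => 0
  | c :: t => (if p c then ((t.length : Int) + 1) else 0) + pvSva p t

theorem pvFoldA (p : Char → Bool) (L : List Char) :
    ∀ (m k : Nat), L.length - k = m → k ≤ L.length → ∀ c0 : Int,
    (PySem.List.pyRange (k : Int) (L.length : Int) 1).foldl (fun count i =>
      match PySem.List.pyGet? L i with
      | some c => if p c then count + ((L.length : Int) - i) else count
      | none => count) c0 = c0 + pvSva p (L.drop k) := by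
  intro m
  induction m with
  | zero =>
    intro k hm hk c0
    have hk' : k = L.length := by omega
    subst hk'
    rw [PySem.List.pyRange_one_eq_nil (by omega)]
    simp [pvSva]
  | succ m ih =>
    intro k hm hk c0
    have hklt : k < L.length := by omega
    rw [PySem.List.pyRange_one_cons (by exact_mod_cast hklt)]
    simp only [List.foldl_cons]
    have hget : PySem.List.pyGet? L (k : Int) = some (L[k]'hklt) := by
      rw [PySem.List.pyGet?_natCast]; simp [hklt]
    rw [hget]
    have hdrop : L.drop k = L[k]'hklt :: L.drop (k + 1) := List.drop_eq_getElem_cons hklt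
    have hlen : ((L.drop (k+1)).length : Int) + 1 = (L.length : Int) - (k : Int) := by
      rw [List.length_drop]; omega
    have : ((k : Int) + 1) = ((k + 1 : Nat) : Int) := by push_cast; ring
    rw [this, ih (k+1) (by omega) (by omega)]
    rw [hdrop]
    simp only [pvSva, hlen]
    split <;> ring

-- [v] is a prefix of L.drop j  ↔  L[j] = v
theorem pvSingle (L : List Char) (v : Char) (j : Nat) (hj : j < L.length) :
    ([v] <+: L.drop j) ↔ L[j]'hj = v := by
  rw [List.drop_eq_getElem_cons hj]
  constructor
  · rintro ⟨t, ht⟩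
    simp only [List.singleton_append, List.cons.injEq] at ht
    exact ht.1.symm
  · rintro rfl
    exact ⟨L.drop (j+1), rfl⟩

theorem pvSva_zero (v : Char) (M : List Char) (h : v ∉ M) :
    pvSva (fun c => c == v) M = 0 := by
  induction M with
  | nil => rfl
  | cons c t ih =>
    simp only [List.mem_cons, not_or] at h
    simp only [pvSva, ih h.2, beq_iff_eq, add_zero]
    rw [if_neg (fun hcv => h.1 hcv.symm)]

theorem pvSva_skip (L : List Char) (v : Char) :
    ∀ d k m, m - k = d → k ≤ m → m ≤ L.length →
    (∀ i (h : i < L.length), k ≤ i → i < m → L[i]'h ≠ v) →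
    pvSva (fun c => c == v) (L.drop k) = pvSva (fun c => c == v) (L.drop m) := by
  intro d
  induction d with
  | zero =>
    intro k m hd h1 h2 h3
    have hkm : k = m := by omega
    rw [hkm]
  | succ d ih =>
    intro k m hd hkm hm hno
    have hk : k < L.length := by omega
    rw [List.drop_eq_getElem_cons hk]
    simp only [pvSva]
    have hne : L[k]'hk ≠ v := hno k hk le_rfl (by omega)
    rw [ih (k+1) m (by omega) (by omega) hm (fun i h h1 h2 => hno i h (by omega) h2)]
    simp [beq_iff_eq, hne]

theorem pvSva_step (L : List Char) (v : Char) (j : Nat) (hj : j < L.length) :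
    pvSva (fun c => c == v) (L.drop j) =
      (if L[j]'hj = v then (L.length : Int) - j else 0) +
        pvSva (fun c => c == v) (L.drop (j+1)) := by
  rw [List.drop_eq_getElem_cons hj]
  simp only [pvSva, List.length_drop, beq_iff_eq]
  have : (((L.length - (j+1) : Nat)) : Int) + 1 = (L.length : Int) - j := by omega
  rw [this]

theorem pvFindLoop_eq (L : List Char) (v : Char) :
    ∀ (fuel : Nat) (k : Nat) (total : Int), L.length + 1 - k ≤ fuel →
    pvFindLoop L v fuel total k = total + pvSva (fun c => c == v) (L.drop k) := by
  intro fuel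
  induction fuel with
  | zero =>
    intro k total hd
    have hk : L.length < k := by omega
    rw [pvFindLoop]
    rw [List.drop_eq_nil_of_le (le_of_lt hk)]
    simp [pvSva]
  | succ fuel ih =>
    intro k total hd
    by_cases hklt : L.length < k
    · rw [pvFindLoop]
      rw [if_pos hklt, List.drop_eq_nil_of_le (le_of_lt hklt)]
      simp [pvSva]
    · have hk : k ≤ L.length := by omega
      rw [pvFindLoop]
      rw [if_neg hklt]
      by_cases hj : PySem.Chars.findFrom L [v] (k : Int) none = -1
      · simp only [hj, if_true]
        have hninf : ¬ ([v] <:+: L.drop k) :=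
          (PySem.Chars.findFrom_natCast_eq_neg_one_iff L [v] k hk).mp hj
        have hnm : v ∉ L.drop k := by
          intro hm
          obtain ⟨s, t, hst⟩ := List.mem_iff_append.mp hm
          exact hninf ⟨s, t, by rw [hst]; simp⟩
        rw [pvSva_zero v _ hnm]
        ring
      · simp only [if_neg hj]
        set j := PySem.Chars.findFrom L [v] (k : Int) none with hjdef
        have hsp := PySem.Chars.findFrom_natCast_spec L [v] k hk hj
        have hkj : (k : Int) ≤ j := hsp.1
        have hj0 : 0 ≤ j := le_trans (by exact_mod_cast Nat.zero_le k) hkj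
        have hpre : [v] <+: L.drop j.toNat := hsp.2.1
        have hjlt : j.toNat < L.length := by
          by_contra h
          have : L.drop j.toNat = [] := List.drop_eq_nil_of_le (by omega)
          rw [this] at hpre
          exact absurd (List.prefix_nil.mp hpre) (by simp)
        have hget : L[j.toNat]'hjlt = v := (pvSingle L v j.toNat hjlt).mp hpre
        have hkjn : k ≤ j.toNat := by omega
        have hskip := pvSva_skip L v (j.toNat - k) k j.toNat (by omega) hkjn (le_of_lt hjlt)
          (fun i h h1 h2 => by
            intro he
            exact hsp.2.2 i h1 h2 ((pvSingle L v i h).mpr he))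
        rw [ih (j.toNat + 1) _ (by omega)]
        rw [hskip, pvSva_step L v j.toNat hjlt]
        have hcast : ((j.toNat : Nat) : Int) = j := Int.toNat_of_nonneg hj0
        rw [if_pos hget, hcast]
        ring

theorem pvSva_or (p q : Char → Bool) (h : ∀ c, ¬(p c = true ∧ q c = true)) :
    ∀ L, pvSva (fun c => p c || q c) L = pvSva p L + pvSva q L := by
  intro L
  induction L with
  | nil => simp [pvSva]
  | cons c t ih =>
    simp only [pvSva, ih]
    by_cases hp : p c = true
    · have hq : q c = false := by
        cases hqc : q c
        · rfl
        · exact absurd ⟨hp, hqc⟩ (h c)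
      simp [hp, hq]; ring
    · simp only [Bool.not_eq_true] at hp
      simp [hp]; ring

theorem pvSva_congr (p q : Char → Bool) (h : ∀ c, p c = q c) :
    ∀ L, pvSva p L = pvSva q L := by
  intro L
  induction L with
  | nil => rfl
  | cons c t ih => simp [pvSva, h c, ih]

theorem pvFoldB (L : List Char) :
    ∀ (vs : List Char), vs.Nodup → ∀ (t0 : Int),
    vs.foldl (fun total v => pvFindLoop L v (L.length + 1) total 0) t0 =
      t0 + pvSva (fun c => vs.contains c) L := by
  intro vs
  induction vs with
  | nil =>
    intro _ t0
    simp only [List.foldl_nil]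
    rw [pvSva_congr _ (fun _ => false) (by simp)]
    have : pvSva (fun _ => false) L = 0 := by
      induction L with
      | nil => rfl
      | cons c t ih => simp [pvSva, ih]
    simp [this]
  | cons v vs' ih =>
    intro hnd t0
    simp only [List.foldl_cons]
    have hnd' := hnd
    rw [List.nodup_cons] at hnd'
    rw [ih hnd'.2]
    rw [pvFindLoop_eq L v (L.length + 1) 0 t0 (by omega)]
    simp only [List.drop_zero]
    have hcongr : ∀ c, (v :: vs').contains c = ((c == v) || vs'.contains c) := by
      intro c; by_cases hcv : c = v <;> simp [hcv]
    rw [pvSva_congr _ _ hcongr L]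
    rw [pvSva_or (fun c => c == v) (fun c => vs'.contains c)
      (fun c => by
        rintro ⟨h1, h2⟩
        rw [beq_iff_eq] at h1
        subst h1
        exact hnd'.1 (by simpa using h2)) L]
    ring

theorem amazing_eq (A : String) :
    amazing_substring_dsa A = amazing_substring_dsa_alt A := by
  unfold amazing_substring_dsa amazing_substring_dsa_alt
  simp only [PySem.Str.len]
  have ha := pvFoldA (fun c => ("aeiouAEIOU".toList).contains c) A.toList
    (A.toList.length) 0 (by omega) (by omega) 0
  have hnd : ("aeiouAEIOU".toList).Nodup := by decide
  have hb := pvFoldB A.toList ("aeiouAEIOU".toList) hnd 0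
  simp only [Nat.cast_zero] at ha
  simp only [PySem.Str.pyGet?_eq, PySem.Chars.pyGet?_eq_listPyGet?]
  rw [hb, ha]
  simp

-- ===== VERDICT (by name: the statement is the Claim_ definition above) =====
theorem amazing_substring_dsa_spec : Claim_equal_amazing_substring_dsa := by
  intro A _
  unfold Spec_amazing_substring_dsa
  exact amazing_eq A
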